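-- pv_equiv track=rewrite | github.com/martinhova01/knowit_kodekalender | 23/23/main.py | get_south
-- ===== SOURCE A (Python) =====
-- def get_south(l):
--     largest = l[0]
--     for coord in l:
--         if coord[0] < largest[0]:
--             largest = coord
--         elif coord[0] == largest[0]:
--             if coord[1] < largest[1]:
--                 largest = coord
--     return largest
-- ===== SOURCE B (Python) =====
-- def get_south(l):
--     return sorted(l, key=lambda c: (c[0], c[1]))[0]
-- ===== Notes on version B (the rewrite author's own statement) =====
-- stated objective: simpler
-- what changed: Replaces the manual min-scan loop with carried best-so-far state by a stable lexicographic sort of the coordinates followed by taking the first element.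
import Mathlib
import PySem

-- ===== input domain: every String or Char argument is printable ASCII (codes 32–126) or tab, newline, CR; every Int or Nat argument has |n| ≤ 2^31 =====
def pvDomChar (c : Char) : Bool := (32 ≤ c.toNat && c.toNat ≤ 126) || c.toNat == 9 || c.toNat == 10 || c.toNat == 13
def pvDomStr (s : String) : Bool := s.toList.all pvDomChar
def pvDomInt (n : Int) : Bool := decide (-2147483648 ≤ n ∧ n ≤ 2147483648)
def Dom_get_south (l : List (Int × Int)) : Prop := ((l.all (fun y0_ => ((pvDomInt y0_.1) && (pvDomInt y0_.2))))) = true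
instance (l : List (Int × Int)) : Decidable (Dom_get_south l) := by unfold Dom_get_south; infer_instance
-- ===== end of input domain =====

-- B replaces A's manual min-scan loop by a stable lexicographic sort + first element (objective: simpler).

-- ===== PORT A =====
def get_south (l : List (Int × Int)) : Int × Int :=
  match PySem.List.pyGet? l 0 with
  | none => (0, 0)   -- unreachable under Pre_: Python raises IndexError on l[0]
  | some largest0 =>
    l.foldl (fun largest coord =>
      if coord.1 < largest.1 then coord
      else if coord.1 = largest.1 then
        (if coord.2 < largest.2 then coord else largest)
      else largest) largest0

-- ===== PORT B =====
def get_south_alt (l : List (Int × Int)) : Int × Int :=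
  match PySem.List.pyGet? (PySem.List.sorted2 l (fun c => c.1) (fun c => c.2) false) 0 with
  | none => (0, 0)   -- unreachable under Pre_: Python raises IndexError on [...][0]
  | some m => m

-- ===== PRECONDITION & SPEC =====
-- Pre_ excludes exactly the empty list, on which both Pythons raise IndexError.
def Pre_get_south (l : List (Int × Int)) : Prop := l ≠ []
instance (l : List (Int × Int)) : Decidable (Pre_get_south l) := by unfold Pre_get_south; infer_instance
def pvWitness_get_south : (List (Int × Int)) := [(2, 1), (0, 5), (0, 3)]

def Spec_get_south (l : List (Int × Int)) (out : Int × Int) : Prop := out = get_south_alt l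
instance (l : List (Int × Int)) (out : Int × Int) : Decidable (Spec_get_south l out) := by unfold Spec_get_south; infer_instance

-- ===== CLAIM (what is proved, stated in full; the proofs are below) =====
def Claim_equal_get_south : Prop := ∀ (l : List (Int × Int)), Dom_get_south l → Pre_get_south l → Spec_get_south l (get_south l)

-- ===== LEMMAS AND PROOFS =====

-- the head of the insertion-sort fold is the strict-less running minimum
lemma foldl_insertBy_head? {α : Type} (before : α → α → Bool) :
    ∀ (t : List α) (h : α) (r : List α),
      (t.foldl (fun acc x => PySem.List.insertBy before x acc) (h :: r)).head? =
        some (t.foldl (fun b c => if before c b then c else b) h) := by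
  intro t
  induction t with
  | nil => intro h r; simp
  | cons c t ih =>
    intro h r
    simp only [List.foldl_cons]
    by_cases hb : before c h
    · have : PySem.List.insertBy before c (h :: r) = c :: h :: r := by
        simp [PySem.List.insertBy, hb]
      rw [this, ih, hb]; simp
    · have : PySem.List.insertBy before c (h :: r) = h :: PySem.List.insertBy before c r := by
        simp [PySem.List.insertBy, hb]
      rw [this, ih]
      simp [hb]

-- first element of a nonempty list through Python indexing
lemma pyGet?_cons_zero {α : Type} (h : α) (t : List α) :
    PySem.List.pyGet? (h :: t) (0 : Int) = some h := by
  simp [PySem.List.pyGet?, PySem.List.pyIdx?]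

-- A's nested-if update equals the single strict lexicographic comparison used by the sort
lemma step_eq (b c : Int × Int) :
    (if c.1 < b.1 then c
     else if c.1 = b.1 then (if c.2 < b.2 then c else b)
     else b) =
    (if (decide (c.1 < b.1) || (!decide (b.1 < c.1) && decide (c.2 < b.2))) then c else b) := by
  by_cases h1 : c.1 < b.1
  · simp [h1]
  · by_cases h2 : c.1 = b.1
    · by_cases h3 : c.2 < b.2 <;> simp [h2, h3]
    · have h4 : b.1 < c.1 := by omega
      simp [h1, h2, h4]

-- ===== VERDICT (by name: the statement is the Claim_ definition above) =====
theorem get_south_spec : Claim_equal_get_south := by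
  intro l _ hpre
  unfold Spec_get_south
  match l with
  | [] => exact absurd rfl hpre
  | h :: t =>
    have hstep : ∀ b c : Int × Int,
        (if c.1 < b.1 then c
         else if c.1 = b.1 then (if c.2 < b.2 then c else b)
         else b) =
        (if (decide (c.1 < b.1) || (!decide (b.1 < c.1) && decide (c.2 < b.2))) then c else b) :=
      step_eq
    have hA : get_south (h :: t) =
        t.foldl (fun b c =>
          if (decide (c.1 < b.1) || (!decide (b.1 < c.1) && decide (c.2 < b.2))) then c else b) h := by
      simp only [get_south, pyGet?_cons_zero, List.foldl_cons, lt_self_iff_false, ite_self]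
      simp only [step_eq]
    have hB : (PySem.List.sorted2 (h :: t) (fun c => c.1) (fun c => c.2) false).head? =
        some (t.foldl (fun b c =>
          if (decide (c.1 < b.1) || (!decide (b.1 < c.1) && decide (c.2 < b.2))) then c else b) h) := by
      simp only [PySem.List.sorted2, List.foldl_cons]
      have h0 : PySem.List.insertBy
          (fun a b => decide (a.1 < b.1) || (!decide (b.1 < a.1) && decide (a.2 < b.2))) h
          ([] : List (Int × Int)) = [h] := by simp [PySem.List.insertBy]
      rw [if_neg (by simp), h0, foldl_insertBy_head?]
    rcases hs : PySem.List.sorted2 (h :: t) (fun c => c.1) (fun c => c.2) false with _ | ⟨m, rest⟩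
    · rw [hs] at hB; simp at hB
    · rw [hs] at hB
      simp only [List.head?_cons, Option.some.injEq] at hB
      simp only [get_south_alt, hs, pyGet?_cons_zero]
      rw [hA, ← hB]
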